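-- pv_equiv track=rewrite | github.com/bibekmaharjan77/DDP-Under-Predictions | run12501.py | generate_type2_submeshes
-- ===== SOURCE A (Python) =====
-- import math, os, random
-- from collections import Counter, defaultdict
--
-- def xy_to_id(x,y,size):
--     return x*size + y
--
-- def generate_type2_submeshes(size):
--     levels = int(math.log2(size))
--     hierarchy = defaultdict(list)
--     for level in range(1, levels):
--         b = 2**level
--         off = b//2
--         for i in range(-off, size, b):
--             for j in range(-off, size, b):
--                 nodes = {
--                     # (x,y)
--                     xy_to_id(x,y,size)
--                     for x in range(i, i+b)
--                     for y in range(j, j+b)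
--                     if 0 <= x < size and 0 <= y < size
--                 }
--                 if nodes:
--                     hierarchy[(level,1)].append(nodes)
--     return hierarchy
-- ===== SOURCE B (Python) =====
-- import math
-- from collections import defaultdict
--
--
-- def generate_type2_submeshes(size):
--     levels = int(math.log2(size))
--     hierarchy = defaultdict(list)
--     for level in range(1, levels):
--         b = 2 ** level
--         off = b // 2
--         buckets = {}
--         for x in range(size):
--             i = (x + off) // b * b - off
--             for y in range(size):
--                 j = (y + off) // b * b - off
--                 buckets.setdefault((i, j), set()).add(x * size + y)
--         for key in sorted(buckets):
--             hierarchy[(level, 1)].append(buckets[key])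
--     return hierarchy
-- ===== Notes on version B (the rewrite author's own statement) =====
-- stated objective: alternative
-- what changed: Instead of scanning every block's b x b cell window (including out-of-range cells) with a per-cell bounds test and an emptiness check, B makes one pass over the valid grid nodes per level, groups node ids into dict buckets keyed by their block origin (i,j)=((x+off)//b*b-off, (y+off)//b*b-off), and appends the buckets in sorted key order.
-- outside the precondition, e.g. on generate_type2_submeshes(0): A raises ValueError, B raises ValueError
import Mathlib
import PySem

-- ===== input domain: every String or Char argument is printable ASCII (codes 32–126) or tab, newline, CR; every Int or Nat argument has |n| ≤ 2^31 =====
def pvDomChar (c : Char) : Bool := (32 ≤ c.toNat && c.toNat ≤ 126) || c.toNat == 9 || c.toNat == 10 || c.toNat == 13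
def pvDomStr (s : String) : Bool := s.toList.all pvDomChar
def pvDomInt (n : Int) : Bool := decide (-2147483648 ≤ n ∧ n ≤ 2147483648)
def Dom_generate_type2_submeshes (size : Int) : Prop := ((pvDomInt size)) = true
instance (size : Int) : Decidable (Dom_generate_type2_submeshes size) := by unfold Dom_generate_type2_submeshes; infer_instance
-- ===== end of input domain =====

-- B replaces A's nested per-block scanning by one pass over the grid that groups node ids
-- into dict buckets keyed by block origin (objective: alternative decomposition, same cost).

-- ===== PORT A =====
def xy_to_id (x y size : Int) : Int := x * size + y

-- int(math.log2(size)) — exact floor(log2) for 1 ≤ size ≤ 2^31 (float log2 is exact enough there)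
def pyIntLog2 (size : Int) : Int := (Nat.log 2 size.toNat : Int)

-- the set comprehension building one block's node-id set (x outer, y inner, filtered)
def blockNodes (size i j b : Int) : List Int :=
  (PySem.List.pyRange i (i + b) 1).foldl (fun s x =>
    (PySem.List.pyRange j (j + b) 1).foldl (fun s y =>
      if 0 ≤ x ∧ x < size ∧ 0 ≤ y ∧ y < size then PySem.Set.add s (xy_to_id x y size) else s) s)
    PySem.Set.empty

-- body of A's 'for level in range(1, levels)' loop
def aLevelStep (size : Int) (h : PySem.Dict (Int × Int) (List (List Int))) (level : Int) :
    PySem.Dict (Int × Int) (List (List Int)) :=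
  let b : Int := 2 ^ level.toNat          -- 2**level (level ≥ 1 inside the loop)
  let off : Int := PySem.Int.floordiv b 2
  (PySem.List.pyRange (-off) size b).foldl (fun h i =>
    (PySem.List.pyRange (-off) size b).foldl (fun h j =>
      let nodes := blockNodes size i j b
      if nodes ≠ [] then h.modify (level, 1) [] (· ++ [nodes]) else h) h) h

def generate_type2_submeshes (size : Int) : List (Int × Int × List (List Int)) :=
  let levels := pyIntLog2 size
  (((PySem.List.pyRange 1 levels 1).foldl (aLevelStep size) PySem.Dict.empty).items.map
    (fun p => (p.1.1, p.1.2, p.2)))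

-- ===== PORT B =====
-- body of B's 'for level in range(1, levels)' loop: one grid pass grouping ids by block origin,
-- then the buckets appended in sorted key order
def bLevelStep (size : Int) (h : PySem.Dict (Int × Int) (List (List Int))) (level : Int) :
    PySem.Dict (Int × Int) (List (List Int)) :=
  let b : Int := 2 ^ level.toNat
  let off : Int := PySem.Int.floordiv b 2
  let buckets : PySem.Dict (Int × Int) (List Int) :=
    (PySem.List.pyRange 0 size 1).foldl (fun bk x =>
      let i := PySem.Int.floordiv (x + off) b * b - off
      (PySem.List.pyRange 0 size 1).foldl (fun bk y =>
        let j := PySem.Int.floordiv (y + off) b * b - off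
        -- buckets.setdefault((i, j), set()).add(x*size + y)
        bk.insert (i, j) (PySem.Set.add (bk.getD (i, j) PySem.Set.empty) (x * size + y))) bk)
      PySem.Dict.empty
  (PySem.List.sorted2 buckets.keys Prod.fst Prod.snd).foldl
    (fun h key => h.modify (level, 1) [] (· ++ [buckets.getD key []])) h   -- buckets[key]: key present

def generate_type2_submeshes_alt (size : Int) : List (Int × Int × List (List Int)) :=
  let levels := pyIntLog2 size
  (((PySem.List.pyRange 1 levels 1).foldl (bLevelStep size) PySem.Dict.empty).items.map
    (fun p => (p.1.1, p.1.2, p.2)))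

-- ===== PRECONDITION & SPEC =====
-- math.log2(size) raises ValueError for size ≤ 0; A returns normally for every size ≥ 1.
def Pre_generate_type2_submeshes (size : Int) : Prop := 1 ≤ size
instance (size : Int) : Decidable (Pre_generate_type2_submeshes size) := by unfold Pre_generate_type2_submeshes; infer_instance
def pvWitness_generate_type2_submeshes : Int := 4

def Spec_generate_type2_submeshes (size : Int) (out : List (Int × Int × List (List Int))) : Prop := out = generate_type2_submeshes_alt size
instance (size : Int) (out : List (Int × Int × List (List Int))) : Decidable (Spec_generate_type2_submeshes size out) := by unfold Spec_generate_type2_submeshes; infer_instance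

-- ===== CLAIM (what is proved, stated in full; the proofs are below) =====
def Claim_equal_generate_type2_submeshes : Prop := ∀ (size : Int), Dom_generate_type2_submeshes size → Pre_generate_type2_submeshes size → Spec_generate_type2_submeshes size (generate_type2_submeshes size)

-- ===== LEMMAS AND PROOFS =====

-- proof-only abbreviations
def pvOrigins (size b off : Int) : List Int := PySem.List.pyRange (-off) size b
def pvFiber (size b i : Int) : List Int := PySem.List.pyRange (max i 0) (min (i + b) size) 1
def pvProd (l1 l2 : List Int) : List (Int × Int) := l1.flatMap (fun x => l2.map (fun y => (x, y)))
def pvOrg (b off x : Int) : Int := PySem.Int.floordiv (x + off) b * b - off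
def pvN (size b i j : Int) : List Int :=
  PySem.Set.ofList ((pvProd (pvFiber size b i) (pvFiber size b j)).map (fun p => p.1 * size + p.2))
def pvLexLT (p q : Int × Int) : Prop := p.1 < q.1 ∨ (p.1 = q.1 ∧ p.2 < q.2)
def pvLexLE (p q : Int × Int) : Prop := ¬ pvLexLT q p

lemma pv_foldl_prodL {γ : Type} (l1 l2 : List Int) (g : γ → Int × Int → γ) (init : γ) :
    (pvProd l1 l2).foldl g init = l1.foldl (fun acc x => l2.foldl (fun a y => g a (x, y)) acc) init := by
  simp [pvProd, List.foldl_flatMap, List.foldl_map]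

lemma pv_mem_prodL {p : Int × Int} {l1 l2 : List Int} :
    p ∈ pvProd l1 l2 ↔ p.1 ∈ l1 ∧ p.2 ∈ l2 := by
  obtain ⟨a, b⟩ := p; simp [pvProd]

lemma pv_rangeFilter (c lo hi : Int) : ∀ (n : Nat) (a : Int), (c - a).toNat = n →
    (PySem.List.pyRange a c 1).filter (fun x => decide (lo ≤ x ∧ x < hi))
      = PySem.List.pyRange (max a lo) (min c hi) 1 := by
  intro n
  induction n with
  | zero =>
    intro a ha
    rw [PySem.List.pyRange_one_eq_nil (by omega), PySem.List.pyRange_one_eq_nil (by omega)]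
    rfl
  | succ n ih =>
    intro a ha
    rw [PySem.List.pyRange_one_cons (by omega)]
    by_cases h1 : lo ≤ a ∧ a < hi
    · rw [List.filter_cons_of_pos (by simpa using h1), ih (a + 1) (by omega),
        show max (a + 1) lo = a + 1 by omega, show max a lo = a by omega]
      exact (PySem.List.pyRange_one_cons (by omega)).symm
    · rw [List.filter_cons_of_neg (by simpa using h1), ih (a + 1) (by omega)]
      by_cases h2 : a < lo
      · rw [show max (a+1) lo = max a lo by omega]
      · rw [PySem.List.pyRange_one_eq_nil (by omega), PySem.List.pyRange_one_eq_nil (by omega)]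

lemma pv_filter_prodL (l1 l2 : List Int) (p1 p2 : Int → Bool) :
    (pvProd l1 l2).filter (fun p => p1 p.1 && p2 p.2) = pvProd (l1.filter p1) (l2.filter p2) := by
  induction l1 with
  | nil => rfl
  | cons x t ih =>
    simp only [pvProd, List.flatMap_cons, List.filter_append, List.filter_cons, List.filter_map] at *
    by_cases hx : p1 x = true
    · simp only [hx, if_pos]
      rw [ih]
      simp only [List.flatMap_cons]
      congr 1
      congr 1
      apply List.filter_congr
      intro y _
      simp [Function.comp, hx]
    · simp only [hx]
      rw [ih]
      simp only [Bool.false_eq_true, if_false]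
      have : (l2.filter ((fun p => p1 p.1 && p2 p.2) ∘ fun y => (x, y))) = [] := by
        apply List.filter_eq_nil_iff.2
        intro y _
        simp [Function.comp, hx]
      rw [this]
      simp

lemma pv_mem_origins {size b off x : Int} (hb : 0 < b) :
    x ∈ pvOrigins size b off ↔ -off ≤ x ∧ x < size ∧ b ∣ x + off := by
  rw [pvOrigins, PySem.List.mem_pyRange_iff_of_pos hb]
  rw [show x - -off = x + off by ring]

lemma pv_org_spec (b off x : Int) (hb : 0 < b) :
    pvOrg b off x ≤ x ∧ x < pvOrg b off x + b ∧ b ∣ pvOrg b off x + off := by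
  unfold pvOrg
  have h1 := PySem.Int.floordiv_mul_add_mod (x + off) b
  have h2 := PySem.Int.mod_nonneg (x + off) hb
  have h3 := PySem.Int.mod_lt (x + off) hb
  refine ⟨by omega, by omega, ?_⟩
  have he : PySem.Int.floordiv (x + off) b * b - off + off = b * PySem.Int.floordiv (x + off) b := by ring
  rw [he]
  exact dvd_mul_right b _

lemma pv_org_mem_origins {size b off x : Int} (hb : 0 < b) (ho0 : 0 ≤ off)
    (h0 : 0 ≤ x) (h1 : x < size) : pvOrg b off x ∈ pvOrigins size b off := by
  obtain ⟨hle, hlt, hdvd⟩ := pv_org_spec b off x hb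
  rw [pv_mem_origins hb]
  refine ⟨?_, by omega, hdvd⟩
  have hq : (0:Int) ≤ PySem.Int.floordiv (x + off) b :=
    (PySem.Int.le_floordiv_iff_mul_le hb).2 (by omega)
  have hm := mul_nonneg hq hb.le
  unfold pvOrg at *
  omega

lemma pv_org_eq_iff {size b off i : Int} (hb : 0 < b) (hi : i ∈ pvOrigins size b off) (x : Int) :
    pvOrg b off x = i ↔ i ≤ x ∧ x < i + b := by
  obtain ⟨hio, hilt, d, hd⟩ := (pv_mem_origins hb).1 hi
  constructor
  · intro he
    obtain ⟨hle, hlt, _⟩ := pv_org_spec b off x hb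
    omega
  · intro ⟨hx1, hx2⟩
    have : PySem.Int.floordiv (x + off) b = d := by
      rw [PySem.Int.floordiv_eq_iff_of_pos hb]
      constructor
      · nlinarith
      · nlinarith
    rw [pvOrg, this]
    have hc : d * b = b * d := mul_comm d b
    omega

lemma pv_filter_org {size b off i : Int} (hb : 0 < b) (hi : i ∈ pvOrigins size b off) :
    (PySem.List.pyRange 0 size 1).filter (fun x => decide (pvOrg b off x = i)) = pvFiber size b i := by
  have h1 : (PySem.List.pyRange 0 size 1).filter (fun x => decide (pvOrg b off x = i))
      = (PySem.List.pyRange 0 size 1).filter (fun x => decide (i ≤ x ∧ x < i + b)) := by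
    apply List.filter_congr
    intro x _
    simp only [decide_eq_decide]
    exact pv_org_eq_iff hb hi x
  rw [h1, pv_rangeFilter size i (i + b) (size - 0).toNat 0 rfl, pvFiber, max_comm, min_comm]

lemma pv_blockNodes_eq (size b i j : Int) :
    blockNodes size i j b = pvN size b i j := by
  have e1 : blockNodes size i j b
      = (pvProd (PySem.List.pyRange i (i + b) 1) (PySem.List.pyRange j (j + b) 1)).foldl
          (fun s p => if 0 ≤ p.1 ∧ p.1 < size ∧ 0 ≤ p.2 ∧ p.2 < size
            then PySem.Set.add s (p.1 * size + p.2) else s) [] :=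
    (pv_foldl_prodL (PySem.List.pyRange i (i + b) 1) (PySem.List.pyRange j (j + b) 1)
      (fun s p => if 0 ≤ p.1 ∧ p.1 < size ∧ 0 ≤ p.2 ∧ p.2 < size
        then PySem.Set.add s (p.1 * size + p.2) else s) []).symm
  have e3 : pvN size b i j
      = (pvProd (pvFiber size b i) (pvFiber size b j)).foldl
          (fun s p => PySem.Set.add s (p.1 * size + p.2)) [] := by
    rw [pvN, PySem.Set.ofList_eq_foldl, List.foldl_map]
  rw [e1, e3, PySem.List.foldl_ite_eq_foldl_filter
    (p := fun p : Int × Int => 0 ≤ p.1 ∧ p.1 < size ∧ 0 ≤ p.2 ∧ p.2 < size)]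
  congr 1
  have e2 : (pvProd (PySem.List.pyRange i (i + b) 1) (PySem.List.pyRange j (j + b) 1)).filter
        (fun p => decide (0 ≤ p.1 ∧ p.1 < size ∧ 0 ≤ p.2 ∧ p.2 < size))
      = (pvProd (PySem.List.pyRange i (i + b) 1) (PySem.List.pyRange j (j + b) 1)).filter
        (fun p => decide (0 ≤ p.1 ∧ p.1 < size) && decide (0 ≤ p.2 ∧ p.2 < size)) := by
    apply List.filter_congr
    intro p _
    simp only [Bool.decide_and, Bool.and_assoc]
  have e4 : (pvProd (PySem.List.pyRange i (i + b) 1) (PySem.List.pyRange j (j + b) 1)).filter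
        (fun p => decide (0 ≤ p.1 ∧ p.1 < size) && decide (0 ≤ p.2 ∧ p.2 < size))
      = pvProd ((PySem.List.pyRange i (i + b) 1).filter (fun x => decide (0 ≤ x ∧ x < size)))
          ((PySem.List.pyRange j (j + b) 1).filter (fun y => decide (0 ≤ y ∧ y < size))) :=
    pv_filter_prodL (PySem.List.pyRange i (i + b) 1) (PySem.List.pyRange j (j + b) 1)
      (fun x => decide (0 ≤ x ∧ x < size)) (fun y => decide (0 ≤ y ∧ y < size))
  rw [e2, e4,
    pv_rangeFilter (i + b) 0 size (i + b - i).toNat i rfl,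
    pv_rangeFilter (j + b) 0 size (j + b - j).toNat j rfl]
  rfl

lemma pv_N_ne_nil {size b off i j : Int} (hs : 1 ≤ size) (hb : 0 < b) (hob : off < b)
    (hi : i ∈ pvOrigins size b off) (hj : j ∈ pvOrigins size b off) :
    pvN size b i j ≠ [] := by
  obtain ⟨hi1, hi2, _⟩ := (pv_mem_origins hb).1 hi
  obtain ⟨hj1, hj2, _⟩ := (pv_mem_origins hb).1 hj
  apply List.ne_nil_of_mem (a := (max i 0) * size + (max j 0))
  rw [pvN, PySem.Set.mem_ofList]
  refine List.mem_map.2 ⟨(max i 0, max j 0), ?_, rfl⟩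
  rw [pv_mem_prodL]
  constructor <;>
    · rw [pvFiber, PySem.List.mem_pyRange_one]; omega

lemma pv_getD_groupFold {β : Type} (key : β → Int × Int) (val : β → Int) :
    ∀ (l : List β) (d : PySem.Dict (Int × Int) (List Int)) (c : Int × Int),
      (l.foldl (fun d p => d.insert (key p) (PySem.Set.add (d.getD (key p) []) (val p))) d).getD c []
        = PySem.Set.update (d.getD c []) ((l.filter (fun p => key p == c)).map val) := by
  intro l
  induction l with
  | nil => intro d c; simp [PySem.Set.update_nil]
  | cons p t ih =>
    intro d c
    simp only [List.foldl_cons, List.filter_cons]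
    rw [ih]
    by_cases hc : key p = c
    · subst hc
      simp only [beq_self_eq_true, if_pos, List.map_cons, PySem.Set.update_cons,
        PySem.Dict.getD_insert_self]
    · have hbeq : (key p == c) = false := by simpa using hc
      simp only [hbeq, Bool.false_eq_true, if_false]
      rw [PySem.Dict.getD_insert_of_ne _ _ _ (Ne.symm hc)]

lemma pv_insertBy_pairwise (x : Int × Int) (ys : List (Int × Int)) (h : ys.Pairwise pvLexLE) :
    (PySem.List.insertBy
      (fun a b => decide (a.1 < b.1) || (!decide (b.1 < a.1) && decide (a.2 < b.2))) x ys).Pairwise pvLexLE := by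
  induction ys with
  | nil => simp [PySem.List.insertBy]
  | cons y t ih =>
    rw [List.pairwise_cons] at h
    show (if (decide (x.1 < y.1) || (!decide (y.1 < x.1) && decide (x.2 < y.2))) = true
      then x :: y :: t else y :: PySem.List.insertBy _ x t).Pairwise pvLexLE
    by_cases hby : (decide (x.1 < y.1) || (!decide (y.1 < x.1) && decide (x.2 < y.2))) = true
    · rw [if_pos hby]
      simp only [Bool.or_eq_true, Bool.and_eq_true, Bool.not_eq_true', decide_eq_true_eq,
        decide_eq_false_iff_not] at hby
      refine List.Pairwise.cons ?_ (List.Pairwise.cons h.1 h.2)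
      intro z hz
      rcases List.mem_cons.1 hz with rfl | hzt
      · unfold pvLexLE pvLexLT; omega
      · have := h.1 z hzt
        unfold pvLexLE pvLexLT at *
        omega
    · rw [if_neg hby]
      simp only [Bool.or_eq_true, Bool.and_eq_true, Bool.not_eq_true', decide_eq_true_eq,
        decide_eq_false_iff_not] at hby
      refine List.Pairwise.cons ?_ (ih h.2)
      intro z hz
      rcases (PySem.List.insertBy_mem_iff _ _ _ _).1 hz with rfl | hzt
      · unfold pvLexLE pvLexLT; omega
      · exact h.1 z hzt

lemma pv_sorted2_eq (xs ys : List (Int × Int)) (hperm : ys.Perm xs) (hp : ys.Pairwise pvLexLT) :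
    PySem.List.sorted2 xs Prod.fst Prod.snd = ys := by
  have hres : (PySem.List.sorted2 xs Prod.fst Prod.snd).Pairwise pvLexLE := by
    rw [show PySem.List.sorted2 xs Prod.fst Prod.snd =
      xs.foldl (fun acc x => PySem.List.insertBy
        (fun a b => decide (a.1 < b.1) || (!decide (b.1 < a.1) && decide (a.2 < b.2))) x acc) [] from rfl]
    have : ∀ (l : List (Int × Int)) (acc : List (Int × Int)), acc.Pairwise pvLexLE →
        (l.foldl (fun acc x => PySem.List.insertBy
          (fun a b => decide (a.1 < b.1) || (!decide (b.1 < a.1) && decide (a.2 < b.2))) x acc) acc).Pairwise pvLexLE := by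
      intro l
      induction l with
      | nil => intro acc h; exact h
      | cons p t iht => intro acc h; exact iht _ (pv_insertBy_pairwise p acc h)
    exact this xs [] (List.Pairwise.nil)
  have hys : ys.Pairwise pvLexLE := hp.imp (by
    intro a b hab
    unfold pvLexLE pvLexLT at *
    omega)
  have hperm2 : (PySem.List.sorted2 xs Prod.fst Prod.snd).Perm ys :=
    (PySem.List.sorted2_perm xs Prod.fst Prod.snd false).trans hperm.symm
  refine List.Perm.eq_of_pairwise ?_ hres hys hperm2
  intro a b _ _ h1 h2
  unfold pvLexLE pvLexLT at h1 h2
  have : a.1 = b.1 ∧ a.2 = b.2 := by omega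
  exact Prod.ext this.1 this.2

lemma pv_pairwise_lex_prod {l : List Int} (hl : l.Pairwise (· < ·)) :
    (pvProd l l).Pairwise pvLexLT := by
  have main : ∀ (l2 : List Int) (l1 : List Int), l1.Pairwise (· < ·) → l2.Pairwise (· < ·) →
      (pvProd l1 l2).Pairwise pvLexLT := by
    intro l2 l1 h1 h2
    induction l1 with
    | nil => exact List.Pairwise.nil
    | cons x t ih =>
      rw [List.pairwise_cons] at h1
      rw [pvProd, List.flatMap_cons]
      apply List.pairwise_append.2
      refine ⟨?_, ih h1.2, ?_⟩
      · apply List.pairwise_map.2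
        exact h2.imp (by intro a b hab; exact Or.inr ⟨rfl, hab⟩)
      · intro p hp q hq
        obtain ⟨y, _, rfl⟩ := List.mem_map.1 hp
        have hq1 : q.1 ∈ t := by
          obtain ⟨a, ha, hqa⟩ := List.mem_flatMap.1 hq
          obtain ⟨bb, _, rfl⟩ := List.mem_map.1 hqa
          exact ha
        exact Or.inl (h1.1 _ hq1)
  exact main l l hl hl

lemma pv_origins_pairwise {size b off : Int} (hb : 0 < b) :
    (pvOrigins size b off).Pairwise (· < ·) := by
  rw [pvOrigins, PySem.List.pyRange_of_pos _ _ hb]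
  apply List.pairwise_map.2
  apply List.Pairwise.imp ?_ (List.pairwise_lt_range)
  intro m n hmn
  have : (m : Int) < (n : Int) := by exact_mod_cast hmn
  nlinarith

-- membership of the bucket keys: exactly the block-origin pairs
lemma pv_keys_mem {size b off : Int} (hs : 1 ≤ size) (hb : 0 < b) (ho0 : 0 ≤ off) (hob : off < b)
    (z : Int × Int) :
    z ∈ (pvProd (PySem.List.pyRange 0 size 1) (PySem.List.pyRange 0 size 1)).map
          (fun p => (pvOrg b off p.1, pvOrg b off p.2))
      ↔ z ∈ pvProd (pvOrigins size b off) (pvOrigins size b off) := by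
  rw [pv_mem_prodL]
  constructor
  · intro hz
    obtain ⟨p, hp, rfl⟩ := List.mem_map.1 hz
    obtain ⟨h1, h2⟩ := pv_mem_prodL.1 hp
    rw [PySem.List.mem_pyRange_one] at h1 h2
    exact ⟨pv_org_mem_origins hb ho0 h1.1 h1.2, pv_org_mem_origins hb ho0 h2.1 h2.2⟩
  · intro ⟨h1, h2⟩
    refine List.mem_map.2 ⟨(max z.1 0, max z.2 0), pv_mem_prodL.2 ⟨?_, ?_⟩, ?_⟩
    · obtain ⟨a1, a2, -⟩ := (pv_mem_origins hb).1 h1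
      rw [PySem.List.mem_pyRange_one]; constructor <;> omega
    · obtain ⟨a1, a2, -⟩ := (pv_mem_origins hb).1 h2
      rw [PySem.List.mem_pyRange_one]; constructor <;> omega
    · obtain ⟨a1, a2, -⟩ := (pv_mem_origins hb).1 h1
      obtain ⟨b1, b2, -⟩ := (pv_mem_origins hb).1 h2
      have e1 : pvOrg b off (max z.1 0) = z.1 := (pv_org_eq_iff hb h1 _).2 (by omega)
      have e2 : pvOrg b off (max z.2 0) = z.2 := (pv_org_eq_iff hb h2 _).2 (by omega)
      simp [e1, e2]

lemma pv_level_eq (size b off : Int) (hs : 1 ≤ size) (hb : 0 < b) (ho0 : 0 ≤ off) (hob : off < b)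
    (h : PySem.Dict (Int × Int) (List (List Int))) (k : Int × Int) :
    (PySem.List.pyRange (-off) size b).foldl (fun h i =>
      (PySem.List.pyRange (-off) size b).foldl (fun h j =>
        if blockNodes size i j b ≠ [] then h.modify k [] (· ++ [blockNodes size i j b]) else h) h) h
    = (PySem.List.sorted2
        ((PySem.List.pyRange 0 size 1).foldl (fun bk x =>
          (PySem.List.pyRange 0 size 1).foldl (fun bk y =>
            bk.insert (pvOrg b off x, pvOrg b off y)
              (PySem.Set.add (bk.getD (pvOrg b off x, pvOrg b off y) PySem.Set.empty) (x * size + y))) bk)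
          PySem.Dict.empty).keys Prod.fst Prod.snd).foldl
        (fun h key => h.modify k [] (· ++ [((PySem.List.pyRange 0 size 1).foldl (fun bk x =>
          (PySem.List.pyRange 0 size 1).foldl (fun bk y =>
            bk.insert (pvOrg b off x, pvOrg b off y)
              (PySem.Set.add (bk.getD (pvOrg b off x, pvOrg b off y) PySem.Set.empty) (x * size + y))) bk)
          PySem.Dict.empty).getD key []])) h := by
  have hbuckets : ((PySem.List.pyRange 0 size 1).foldl (fun bk x =>
          (PySem.List.pyRange 0 size 1).foldl (fun bk y =>
            bk.insert (pvOrg b off x, pvOrg b off y)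
              (PySem.Set.add (bk.getD (pvOrg b off x, pvOrg b off y) PySem.Set.empty) (x * size + y))) bk)
          PySem.Dict.empty)
      = (pvProd (PySem.List.pyRange 0 size 1) (PySem.List.pyRange 0 size 1)).foldl
          (fun bk p => bk.insert (pvOrg b off p.1, pvOrg b off p.2)
            (PySem.Set.add (bk.getD (pvOrg b off p.1, pvOrg b off p.2) []) (p.1 * size + p.2)))
          PySem.Dict.empty :=
    (pv_foldl_prodL (PySem.List.pyRange 0 size 1) (PySem.List.pyRange 0 size 1)
      (fun bk p => bk.insert (pvOrg b off p.1, pvOrg b off p.2)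
        (PySem.Set.add (bk.getD (pvOrg b off p.1, pvOrg b off p.2) []) (p.1 * size + p.2)))
      PySem.Dict.empty).symm
  rw [hbuckets]
  have hkeys : ((pvProd (PySem.List.pyRange 0 size 1) (PySem.List.pyRange 0 size 1)).foldl
          (fun bk p => bk.insert (pvOrg b off p.1, pvOrg b off p.2)
            (PySem.Set.add (bk.getD (pvOrg b off p.1, pvOrg b off p.2) []) (p.1 * size + p.2)))
          PySem.Dict.empty).keys
      = PySem.Set.ofList ((pvProd (PySem.List.pyRange 0 size 1) (PySem.List.pyRange 0 size 1)).map
          (fun p => (pvOrg b off p.1, pvOrg b off p.2))) := by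
    have h0 := PySem.Dict.keys_foldl_insert_key
      (pvProd (PySem.List.pyRange 0 size 1) (PySem.List.pyRange 0 size 1))
      (fun p : Int × Int => (pvOrg b off p.1, pvOrg b off p.2))
      (fun d p => PySem.Set.add (d.getD (pvOrg b off p.1, pvOrg b off p.2) []) (p.1 * size + p.2))
      PySem.Dict.empty
    rw [h0]
    exact PySem.Set.update_nil_left _
  have hPpair : (pvProd (pvOrigins size b off) (pvOrigins size b off)).Pairwise pvLexLT :=
    pv_pairwise_lex_prod (pv_origins_pairwise hb)
  have hPnodup : (pvProd (pvOrigins size b off) (pvOrigins size b off)).Nodup :=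
    hPpair.imp (by
      intro a c hac
      unfold pvLexLT at hac
      intro he
      subst he
      omega)
  have hperm : (pvProd (pvOrigins size b off) (pvOrigins size b off)).Perm
      ((pvProd (PySem.List.pyRange 0 size 1) (PySem.List.pyRange 0 size 1)).foldl
          (fun bk p => bk.insert (pvOrg b off p.1, pvOrg b off p.2)
            (PySem.Set.add (bk.getD (pvOrg b off p.1, pvOrg b off p.2) []) (p.1 * size + p.2)))
          PySem.Dict.empty).keys := by
    rw [hkeys]
    apply (List.perm_ext_iff_of_nodup hPnodup (PySem.Set.nodup_ofList _)).2
    intro z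
    rw [PySem.Set.mem_ofList]
    exact (pv_keys_mem hs hb ho0 hob z).symm
  have hsorted := pv_sorted2_eq _ _ hperm hPpair
  rw [hsorted]
  have hgetD : ∀ p ∈ pvProd (pvOrigins size b off) (pvOrigins size b off),
      ((pvProd (PySem.List.pyRange 0 size 1) (PySem.List.pyRange 0 size 1)).foldl
          (fun bk q => bk.insert (pvOrg b off q.1, pvOrg b off q.2)
            (PySem.Set.add (bk.getD (pvOrg b off q.1, pvOrg b off q.2) []) (q.1 * size + q.2)))
          PySem.Dict.empty).getD p []
        = pvN size b p.1 p.2 := by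
    intro p hp
    obtain ⟨hp1, hp2⟩ := pv_mem_prodL.1 hp
    have h0 := pv_getD_groupFold (fun q : Int × Int => (pvOrg b off q.1, pvOrg b off q.2))
      (fun q : Int × Int => q.1 * size + q.2)
      (pvProd (PySem.List.pyRange 0 size 1) (PySem.List.pyRange 0 size 1)) PySem.Dict.empty p
    rw [h0, PySem.Dict.getD_empty, PySem.Set.update_nil_left]
    have e0 : (pvProd (PySem.List.pyRange 0 size 1) (PySem.List.pyRange 0 size 1)).filter
          (fun q => ((pvOrg b off q.1, pvOrg b off q.2) == p))
        = (pvProd (PySem.List.pyRange 0 size 1) (PySem.List.pyRange 0 size 1)).filter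
          (fun q => decide (pvOrg b off q.1 = p.1) && decide (pvOrg b off q.2 = p.2)) := by
      apply List.filter_congr
      intro q _
      obtain ⟨c, d⟩ := p
      by_cases h1 : pvOrg b off q.1 = c <;> by_cases h2 : pvOrg b off q.2 = d <;>
        simp [h1, h2]
    have e1 := pv_filter_prodL (PySem.List.pyRange 0 size 1) (PySem.List.pyRange 0 size 1)
      (fun x => decide (pvOrg b off x = p.1)) (fun y => decide (pvOrg b off y = p.2))
    rw [e0, e1, pv_filter_org hb hp1, pv_filter_org hb hp2]
    rfl
  have hA : (PySem.List.pyRange (-off) size b).foldl (fun h i =>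
      (PySem.List.pyRange (-off) size b).foldl (fun h j =>
        if blockNodes size i j b ≠ [] then h.modify k [] (· ++ [blockNodes size i j b]) else h) h) h
      = (pvProd (pvOrigins size b off) (pvOrigins size b off)).foldl
          (fun h p => h.modify k [] (· ++ [pvN size b p.1 p.2])) h := by
    have step : (PySem.List.pyRange (-off) size b).foldl (fun h i =>
        (PySem.List.pyRange (-off) size b).foldl (fun h j =>
          if blockNodes size i j b ≠ [] then h.modify k [] (· ++ [blockNodes size i j b]) else h) h) h
        = (pvOrigins size b off).foldl (fun h i =>
            (pvOrigins size b off).foldl (fun h j => h.modify k [] (· ++ [pvN size b i j])) h) h := by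
      apply PySem.List.foldl_congr_mem
      intro acc i hi
      apply PySem.List.foldl_congr_mem
      intro acc2 j hj
      rw [pv_blockNodes_eq]
      rw [if_pos (pv_N_ne_nil hs hb hob hi hj)]
    rw [step]
    exact (pv_foldl_prodL (pvOrigins size b off) (pvOrigins size b off)
      (fun h p => h.modify k [] (· ++ [pvN size b p.1 p.2])) h).symm
  rw [hA]
  refine (PySem.List.foldl_congr_mem _ _ _ _ ?_).symm
  intro acc p hp
  rw [hgetD p hp]

lemma pv_step_eq (size : Int) (hs : 1 ≤ size) (h : PySem.Dict (Int × Int) (List (List Int)))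
    (level : Int) (hl : 1 ≤ level) : aLevelStep size h level = bLevelStep size h level := by
  have ht : 1 ≤ level.toNat := by omega
  have hm : (0:Int) < 2 ^ (level.toNat - 1) := pow_pos (by norm_num) _
  have hb2 : (2:Int) ^ level.toNat = 2 ^ (level.toNat - 1) * 2 := by
    rw [← pow_succ]
    congr 1
    omega
  have hoff : PySem.Int.floordiv ((2:Int) ^ level.toNat) 2 = 2 ^ (level.toNat - 1) := by
    rw [PySem.Int.floordiv_eq_ediv_of_pos (by norm_num), hb2, Int.mul_ediv_cancel _ (by norm_num)]
  have hb : (0:Int) < 2 ^ level.toNat := pow_pos (by norm_num) _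
  exact pv_level_eq size (2 ^ level.toNat) (PySem.Int.floordiv ((2:Int) ^ level.toNat) 2) hs hb
    (by rw [hoff]; exact hm.le) (by rw [hoff, hb2]; omega) h (level, 1)

-- ===== VERDICT (by name: the statement is the Claim_ definition above) =====
theorem generate_type2_submeshes_spec : Claim_equal_generate_type2_submeshes := by
  intro size _ hpre
  unfold Spec_generate_type2_submeshes generate_type2_submeshes generate_type2_submeshes_alt
  have : (PySem.List.pyRange 1 (pyIntLog2 size) 1).foldl (aLevelStep size) PySem.Dict.empty
       = (PySem.List.pyRange 1 (pyIntLog2 size) 1).foldl (bLevelStep size) PySem.Dict.empty := by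
    apply PySem.List.foldl_congr_mem
    intro acc level hmem
    have h1 : 1 ≤ level := ((PySem.List.mem_pyRange_one).1 hmem).1
    exact pv_step_eq size hpre acc level h1
  simp only [this]
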